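-- pv_equiv track=rewrite | github.com/brainer3220/law | packages/legal_tools/multi_turn_chat.py | _shared_prefix
-- ===== SOURCE A (Python) =====
-- from typing import Any, Dict, Iterable, Iterator, List, Optional, Sequence, Tuple
--
-- def _shared_prefix(
--
--     existing: Sequence[Tuple[str, str]],
--     incoming: Sequence[Tuple[str, str]],
-- ) -> int:
--     count = 0
--     for old, new in zip(existing, incoming):
--         if old != new:
--             break
--         count += 1
--     return count
-- ===== SOURCE B (Python) =====
-- def _commonprefix(m):
--     # algorithm of os.path.commonprefix: scan the lexicographic min against the max
--     if not m:
--         return []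
--     s1 = min(m)
--     s2 = max(m)
--     for i, c in enumerate(s1):
--         if c != s2[i]:
--             return s1[:i]
--     return s1
--
--
-- def _shared_prefix(existing, incoming):
--     return len(_commonprefix([existing, incoming]))
-- ===== Notes on version B (the rewrite author's own statement) =====
-- stated objective: alternative
-- what changed: Replaces A's counter-incrementing pairwise loop over zip(existing, incoming) with the os.path.commonprefix algorithm: take the lexicographic min and max of the two sequences and scan the min against the max, returning the length of the resulting common prefix.
import Mathlib
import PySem

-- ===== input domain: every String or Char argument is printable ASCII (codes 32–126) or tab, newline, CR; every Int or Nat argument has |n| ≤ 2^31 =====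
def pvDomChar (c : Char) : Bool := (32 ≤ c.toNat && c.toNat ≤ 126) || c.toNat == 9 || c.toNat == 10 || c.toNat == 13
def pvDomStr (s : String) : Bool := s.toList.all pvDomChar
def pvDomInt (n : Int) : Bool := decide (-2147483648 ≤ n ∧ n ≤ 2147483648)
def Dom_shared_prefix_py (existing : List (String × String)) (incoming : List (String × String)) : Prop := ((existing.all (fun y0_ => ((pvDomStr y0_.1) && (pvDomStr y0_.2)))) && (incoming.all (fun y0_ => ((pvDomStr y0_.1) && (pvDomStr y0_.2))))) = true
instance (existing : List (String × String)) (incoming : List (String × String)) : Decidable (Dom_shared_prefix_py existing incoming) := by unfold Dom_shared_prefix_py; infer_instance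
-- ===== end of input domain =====

-- B replaces A's explicit counter loop with the os.path.commonprefix algorithm (lexicographic
-- min/max, then scan min against max); an alternative strategy with the same result.

-- ===== PORT A =====
-- 'count = 0; for old, new in zip(existing, incoming): if old != new: break; count += 1'
def pvALoop : List ((String × String) × (String × String)) → Int → Int
  | [], count => count
  | (old, new) :: rest, count => if old ≠ new then count else pvALoop rest (count + 1)

def shared_prefix_py (existing : List (String × String)) (incoming : List (String × String)) : Int :=
  pvALoop (existing.zip incoming) 0

-- ===== PORT B =====
-- Source B: len(_commonprefix([existing, incoming])) where _commonprefix is the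
-- os.path.commonprefix algorithm: s1 = min(m); s2 = max(m); scan s1 against s2.
-- Python's tuple/list '<' is lexicographic; strings compare by code points:
def pvLtChars : List Char → List Char → Bool
  | _, [] => false
  | [], _ :: _ => true
  | a :: as, b :: bs => if a < b then true else if b < a then false else pvLtChars as bs

def pvLtStr (a b : String) : Bool := pvLtChars a.toList b.toList

def pvLtPair (a b : String × String) : Bool :=
  if pvLtStr a.1 b.1 then true else if pvLtStr b.1 a.1 then false else pvLtStr a.2 b.2

def pvLtL : List (String × String) → List (String × String) → Bool
  | _, [] => false
  | [], _ :: _ => true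
  | a :: as, b :: bs => if pvLtPair a b then true else if pvLtPair b a then false else pvLtL as bs

-- 'for i, c in enumerate(s1): if c != s2[i]: return len(s1[:i]); return len(s1)'
def pvBLoop : List (String × String) → List (String × String) → Nat → Int → Int
  | [], _, _, n => n
  | c :: rest, s2, i, n =>
    match PySem.List.pyGet? s2 (i : Int) with
    | none => 0   -- Python IndexError; unreachable: s1 = min never scans past s2 = max
    | some d => if c ≠ d then (i : Int) else pvBLoop rest s2 (i + 1) n

def shared_prefix_py_alt (existing : List (String × String)) (incoming : List (String × String)) : Int :=
  -- min([existing, incoming]) and max([existing, incoming])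
  let s1 := if pvLtL incoming existing then incoming else existing
  let s2 := if pvLtL existing incoming then incoming else existing
  pvBLoop s1 s2 0 (s1.length : Int)

-- ===== PRECONDITION & SPEC =====
def Spec_shared_prefix_py (existing : List (String × String)) (incoming : List (String × String)) (out : Int) : Prop := out = shared_prefix_py_alt existing incoming
instance (existing : List (String × String)) (incoming : List (String × String)) (out : Int) : Decidable (Spec_shared_prefix_py existing incoming out) := by unfold Spec_shared_prefix_py; infer_instance

-- ===== CLAIM (what is proved, stated in full; the proofs are below) =====
def Claim_equal_shared_prefix_py : Prop := ∀ (existing : List (String × String)) (incoming : List (String × String)), Dom_shared_prefix_py existing incoming → Spec_shared_prefix_py existing incoming (shared_prefix_py existing incoming)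

-- ===== LEMMAS AND PROOFS =====

-- common-prefix length, the shared mathematical characterisation of both ports
def pvCp : List (String × String) → List (String × String) → Int
  | x :: xs, y :: ys => if x = y then pvCp xs ys + 1 else 0
  | _, _ => 0

theorem pvCp_comm : ∀ (a b : List (String × String)), pvCp a b = pvCp b a := by
  intro a
  induction a with
  | nil => intro b; cases b <;> simp [pvCp]
  | cons x xs ih =>
    intro b
    cases b with
    | nil => simp [pvCp]
    | cons y ys =>
      simp only [pvCp]
      by_cases h : x = y
      · subst h; simp [ih]
      · rw [if_neg h, if_neg (fun hyx => h hyx.symm)]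

theorem pvALoop_eq : ∀ (a b : List (String × String)) (c : Int),
    pvALoop (a.zip b) c = c + pvCp a b := by
  intro a
  induction a with
  | nil => intro b c; cases b <;> simp [pvALoop, pvCp]
  | cons x xs ih =>
    intro b c
    cases b with
    | nil => simp [pvALoop, pvCp]
    | cons y ys =>
      simp only [List.zip_cons_cons, pvALoop, pvCp]
      by_cases h : x = y
      · simp [h, ih]; ring
      · simp [h]

-- pvBLoop, re-expressed structurally over the not-yet-scanned suffix of s2
def pvBAux : List (String × String) → List (String × String) → Nat → Int → Int
  | [], _, _, n => n
  | _ :: _, [], _, _ => 0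
  | c :: rest, d :: ds, i, n => if c ≠ d then (i : Int) else pvBAux rest ds (i + 1) n

theorem pvBLoop_eq_aux : ∀ (s1 s2 : List (String × String)) (i : Nat) (n : Int),
    pvBLoop s1 s2 i n = pvBAux s1 (s2.drop i) i n := by
  intro s1
  induction s1 with
  | nil => intro s2 i n; simp [pvBLoop, pvBAux]
  | cons c rest ih =>
    intro s2 i n
    have hget : PySem.List.pyGet? s2 (i : Int) = (s2.drop i).head? := by
      rw [PySem.List.pyGet?_natCast, List.head?_drop]
    cases h : s2.drop i with
    | nil =>
      simp only [pvBLoop, hget, h, List.head?_nil, pvBAux]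
    | cons d ds =>
      have hnext : s2.drop (i + 1) = ds := by
        rw [← List.tail_drop, h, List.tail_cons]
      simp only [pvBLoop, hget, h, List.head?_cons, pvBAux, ih, hnext]

-- irreflexivity and asymmetry of the Python lexicographic orders
theorem pvLtChars_irrefl : ∀ (a : List Char), pvLtChars a a = false := by
  intro a; induction a with
  | nil => simp [pvLtChars]
  | cons x xs ih => simp [pvLtChars, ih]

theorem pvLtStr_irrefl (a : String) : pvLtStr a a = false := pvLtChars_irrefl _

theorem pvLtPair_irrefl (a : String × String) : pvLtPair a a = false := by
  simp [pvLtPair, pvLtStr_irrefl]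

theorem pvLtChars_asymm : ∀ (a b : List Char), pvLtChars a b = true → pvLtChars b a = false := by
  intro a
  induction a with
  | nil => intro b h; cases b <;> simp_all [pvLtChars]
  | cons x xs ih =>
    intro b h
    cases b with
    | nil => simp [pvLtChars] at h
    | cons y ys =>
      simp only [pvLtChars] at h ⊢
      rcases lt_trichotomy x y with hxy | hxy | hxy
      · simp [hxy, not_lt_of_gt hxy]
      · subst hxy
        simp only [lt_irrefl, if_false] at h ⊢
        exact ih ys h
      · simp [hxy, not_lt_of_gt hxy] at h
theorem pvLtStr_asymm (a b : String) : pvLtStr a b = true → pvLtStr b a = false :=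
  pvLtChars_asymm _ _

theorem pvLtPair_asymm (a b : String × String) : pvLtPair a b = true → pvLtPair b a = false := by
  intro h
  simp only [pvLtPair] at h ⊢
  by_cases h1 : pvLtStr a.1 b.1 = true
  · simp [pvLtStr_asymm _ _ h1, h1]
  · simp only [h1] at h
    by_cases h2 : pvLtStr b.1 a.1 = true
    · simp [h2] at h
    · simp only [h2] at h
      simp [h1, h2, pvLtStr_asymm _ _ h]

theorem pvLtL_asymm : ∀ (a b : List (String × String)), pvLtL a b = true → pvLtL b a = false := by
  intro a
  induction a with
  | nil => intro b h; cases b <;> simp_all [pvLtL]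
  | cons x xs ih =>
    intro b h
    cases b with
    | nil => simp [pvLtL] at h
    | cons y ys =>
      simp only [pvLtL] at h ⊢
      by_cases hxy : pvLtPair x y = true
      · simp [hxy, pvLtPair_asymm _ _ hxy]
      · simp only [hxy] at h
        by_cases hyx : pvLtPair y x = true
        · simp [hyx] at h
        · simp only [hyx] at h
          simp [hxy, hyx, ih ys h]

-- antisymmetry: neither strictly below the other forces equality
theorem pvLtChars_antisymm : ∀ (a b : List Char),
    pvLtChars a b = false → pvLtChars b a = false → a = b := by
  intro a
  induction a with
  | nil => intro b h1 _; cases b <;> simp_all [pvLtChars]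
  | cons x xs ih =>
    intro b h1 h2
    cases b with
    | nil => simp [pvLtChars] at h2
    | cons y ys =>
      simp only [pvLtChars] at h1 h2
      rcases lt_trichotomy x y with hxy | hxy | hxy
      · simp [hxy] at h1
      · subst hxy
        simp only [lt_irrefl, if_false] at h1 h2
        rw [ih ys h1 h2]
      · simp [hxy] at h2

theorem pvLtStr_antisymm (a b : String) :
    pvLtStr a b = false → pvLtStr b a = false → a = b := by
  intro h1 h2
  have := pvLtChars_antisymm a.toList b.toList h1 h2
  exact String.toList_inj.mp this

theorem pvLtPair_antisymm (a b : String × String) :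
    pvLtPair a b = false → pvLtPair b a = false → a = b := by
  intro h1 h2
  simp only [pvLtPair] at h1 h2
  by_cases hf : pvLtStr a.1 b.1 = true
  · simp [hf] at h1
  · by_cases hg : pvLtStr b.1 a.1 = true
    · simp [hg] at h2
    · simp only [hf, hg] at h1 h2
      have e1 : a.1 = b.1 :=
        pvLtStr_antisymm _ _ (by simpa using hf) (by simpa using hg)
      have e2 : a.2 = b.2 := pvLtStr_antisymm _ _ h1 h2
      exact Prod.ext e1 e2

theorem pvLtL_antisymm : ∀ (a b : List (String × String)),
    pvLtL a b = false → pvLtL b a = false → a = b := by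
  intro a
  induction a with
  | nil => intro b h1 _; cases b <;> simp_all [pvLtL]
  | cons x xs ih =>
    intro b h1 h2
    cases b with
    | nil => simp [pvLtL] at h2
    | cons y ys =>
      simp only [pvLtL] at h1 h2
      by_cases hxy : pvLtPair x y = true
      · simp [hxy] at h1
      · by_cases hyx : pvLtPair y x = true
        · simp [hyx] at h2
        · simp only [hxy, hyx] at h1 h2
          rw [pvLtPair_antisymm x y (by simpa using hxy) (by simpa using hyx),
              ih ys h1 h2]

-- scanning the lexicographically smaller list against the larger yields the common-prefix length
theorem pvBAux_eq_cp : ∀ (s1 s2 : List (String × String)) (i : Nat),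
    pvLtL s2 s1 = false →
    pvBAux s1 s2 i ((i : Int) + (s1.length : Int)) = (i : Int) + pvCp s1 s2 := by
  intro s1
  induction s1 with
  | nil =>
    intro s2 i _
    cases s2 <;> simp [pvBAux, pvCp]
  | cons c rest ih =>
    intro s2 i h
    cases s2 with
    | nil => simp [pvLtL] at h
    | cons d ds =>
      simp only [pvLtL] at h
      by_cases hcd : c = d
      · subst hcd
        simp only [pvLtPair_irrefl] at h
        simp only [pvBAux, ne_eq, not_true_eq_false, if_false, reduceIte, pvCp]
        have : (i : Int) + ((c :: rest).length : Int) = ((i + 1 : Nat) : Int) + (rest.length : Int) := by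
          simp only [List.length_cons]; push_cast; ring
        rw [this, ih ds (i + 1) h]
        push_cast; ring
      · have hne : c ≠ d := hcd
        simp [pvBAux, hne, pvCp]

theorem pvBLoop_min_max (a b : List (String × String)) :
    pvBLoop (if pvLtL b a then b else a) (if pvLtL a b then b else a) 0
      (((if pvLtL b a then b else a).length : Int)) = pvCp a b := by
  by_cases hab : pvLtL a b = true
  · have hba : pvLtL b a = false := pvLtL_asymm _ _ hab
    rw [hab, hba]
    simp only [if_false, if_true, Bool.false_eq_true]
    rw [pvBLoop_eq_aux, List.drop_zero]
    have := pvBAux_eq_cp a b 0 hba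
    simpa using this
  · have hab' : pvLtL a b = false := by simpa using hab
    rw [hab']
    by_cases hba : pvLtL b a = true
    · rw [hba]
      simp only [if_true, Bool.false_eq_true, reduceIte]
      rw [pvBLoop_eq_aux, List.drop_zero]
      have := pvBAux_eq_cp b a 0 hab'
      simpa [pvCp_comm b a] using this
    · have hba' : pvLtL b a = false := by simpa using hba
      have heq : a = b := pvLtL_antisymm a b hab' hba'
      subst heq
      rw [hba']
      simp only [Bool.false_eq_true, reduceIte]
      rw [pvBLoop_eq_aux, List.drop_zero]
      have := pvBAux_eq_cp a a 0 hba'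
      simpa using this

-- ===== VERDICT (by name: the statement is the Claim_ definition above) =====
theorem shared_prefix_py_spec : Claim_equal_shared_prefix_py := by
  intro existing incoming _
  unfold Spec_shared_prefix_py shared_prefix_py shared_prefix_py_alt
  rw [pvALoop_eq, pvBLoop_min_max]
  ring
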